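-- pv_equiv track=rewrite | github.com/Aurora-Jennifer/Aurora | ml/structural_leakage_audit.py | detect_forward_looking_names
-- ===== SOURCE A (Python) =====
-- from typing import List, Tuple, Dict, Any
--
-- def detect_forward_looking_names(feature_cols: List[str]) -> List[str]:
--     """
--     Detect obviously forward-looking features by name patterns.
--
--     Args:
--         feature_cols: Feature column names
--
--     Returns:
--         List of suspicious feature names
--     """
--     BANNED_TOKENS = [
--         'fwd', 'forward', 'future', 'label', 'target', 'ret_fwd', 'excess_ret_fwd',
--         'oof', 'rank_ret_fwd', '_fwd_', 'ahead', 'lookahead', 'next_'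
--     ]
--
--     suspicious = []
--     for feature in feature_cols:
--         feature_lower = feature.lower()
--         for token in BANNED_TOKENS:
--             if token in feature_lower:
--                 suspicious.append(feature)
--                 break
--
--     return suspicious
-- ===== SOURCE B (Python) =====
-- # B: hand-rolled substring scanner. The banned-token table is reduced to its
-- # minimal antichain and indexed by first character; each lowered name is
-- # scanned position by position, testing only the tokens in that character's
-- # bucket via startswith -- no per-token 'in' membership calls.
-- _BUCKETS = {
--     'f': ('fwd', 'forward', 'future'),
--     'l': ('label',),
--     't': ('target',),
--     'o': ('oof',),
--     'a': ('ahead',),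
--     'n': ('next_',),
-- }
--
-- def _scan(low):
--     for i, ch in enumerate(low):
--         for t in _BUCKETS.get(ch, ()):
--             if low.startswith(t, i):
--                 return True
--     return False
--
-- def detect_forward_looking_names(feature_cols):
--     return [f for f in feature_cols if _scan(f.lower())]
-- ===== Notes on version B (the rewrite author's own statement) =====
-- stated objective: alternative
-- what changed: Replaces the per-token substring-membership loop with a hand-rolled position-by-position scanner: the 13 tokens are reduced to their 8-element minimal antichain (e.g. 'ret_fwd', 'lookahead' are redundant since they contain 'fwd'/'ahead'), indexed by first character in a dispatch table, and each lowered name is scanned once, testing only the matching bucket's tokens with startswith at each position.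
import Mathlib
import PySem

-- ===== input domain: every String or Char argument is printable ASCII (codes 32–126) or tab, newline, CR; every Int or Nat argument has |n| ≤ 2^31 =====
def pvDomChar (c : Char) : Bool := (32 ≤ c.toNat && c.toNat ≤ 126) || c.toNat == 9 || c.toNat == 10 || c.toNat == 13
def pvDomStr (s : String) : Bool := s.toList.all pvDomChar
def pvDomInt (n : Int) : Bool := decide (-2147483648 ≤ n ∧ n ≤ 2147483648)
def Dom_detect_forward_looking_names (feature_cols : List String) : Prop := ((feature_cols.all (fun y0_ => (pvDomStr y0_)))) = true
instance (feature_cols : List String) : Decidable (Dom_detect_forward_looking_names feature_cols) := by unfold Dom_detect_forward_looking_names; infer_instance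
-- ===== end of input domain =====

-- ===== PORT A =====
-- A: for each feature, scan the banned-token list and break on the first hit.
def pvBannedTokens : List String :=
  ["fwd", "forward", "future", "label", "target", "ret_fwd", "excess_ret_fwd",
   "oof", "rank_ret_fwd", "_fwd_", "ahead", "lookahead", "next_"]

-- the inner 'for token in BANNED_TOKENS: if token in feature_lower: ... break' loop
def pvTokenLoop (feature_lower : String) : List String → Bool
  | [] => false
  | token :: rest =>
      if PySem.Str.isIn token feature_lower then true else pvTokenLoop feature_lower rest

-- one iteration of A's outer loop
def pvStep (suspicious : List String) (feature : String) : List String :=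
  let feature_lower := PySem.Str.lower feature
  if pvTokenLoop feature_lower pvBannedTokens then suspicious ++ [feature] else suspicious

def detect_forward_looking_names (feature_cols : List String) : List String :=
  feature_cols.foldl pvStep []

-- ===== PORT B =====
-- B: first-character bucket table over the minimal antichain of tokens (Source B's _BUCKETS).
def pvBuckets (c : Char) : List String :=
  if c = 'f' then ["fwd", "forward", "future"]
  else if c = 'l' then ["label"]
  else if c = 't' then ["target"]
  else if c = 'o' then ["oof"]
  else if c = 'a' then ["ahead"]
  else if c = 'n' then ["next_"]
  else []

-- Source B's _scan: walk the lowered name position by position, testing only the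
-- current character's bucket with a prefix check (startswith at that position).
def pvScan : List Char → Bool
  | [] => false
  | c :: rest =>
      if (pvBuckets c).any (fun t => t.toList.isPrefixOf (c :: rest)) then true
      else pvScan rest

def detect_forward_looking_names_alt (feature_cols : List String) : List String :=
  feature_cols.filter (fun f => pvScan (PySem.Str.lower f).toList)

-- ===== PRECONDITION & SPEC =====
def Spec_detect_forward_looking_names (feature_cols : List String) (out : List String) : Prop := out = detect_forward_looking_names_alt feature_cols
instance (feature_cols : List String) (out : List String) : Decidable (Spec_detect_forward_looking_names feature_cols out) := by unfold Spec_detect_forward_looking_names; infer_instance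

-- ===== CLAIM (what is proved, stated in full; the proofs are below) =====
def Claim_equal_detect_forward_looking_names : Prop := ∀ (feature_cols : List String), Dom_detect_forward_looking_names feature_cols → Spec_detect_forward_looking_names feature_cols (detect_forward_looking_names feature_cols)

-- ===== LEMMAS AND PROOFS =====

-- the antichain of pvBannedTokens, as one flat list (B's buckets, concatenated)
def pvEffectiveTokens : List String :=
  ["fwd", "forward", "future", "label", "target", "oof", "ahead", "next_"]

-- a substring check by a superstring token implies the check by its substring
theorem pv_isIn_mono (a b s : String) (h : a.toList <:+: b.toList)
    (hb : PySem.Str.isIn b s = true) : PySem.Str.isIn a s = true := by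
  rw [PySem.Str.isIn_iff_infix] at hb ⊢
  exact h.trans hb

-- the break-loop is List.any
theorem pv_tokenLoop_eq_any (s : String) (ts : List String) :
    pvTokenLoop s ts = ts.any (fun t => PySem.Str.isIn t s) := by
  induction ts with
  | nil => rfl
  | cons t rest ih =>
    cases h : PySem.Str.isIn t s <;> simp [pvTokenLoop, ih]

-- the 13-token table and its 8-token antichain flag the same strings
theorem pv_tokens_equiv (s : String) :
    pvBannedTokens.any (fun t => PySem.Str.isIn t s)
      = pvEffectiveTokens.any (fun t => PySem.Str.isIn t s) := by
  rw [Bool.eq_iff_iff]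
  simp only [pvBannedTokens, pvEffectiveTokens, List.any_eq_true, List.mem_cons,
    List.not_mem_nil, or_false]
  constructor
  · rintro ⟨t, ht, hin⟩
    rcases ht with rfl|rfl|rfl|rfl|rfl|rfl|rfl|rfl|rfl|rfl|rfl|rfl|rfl
    · exact ⟨"fwd", by tauto, hin⟩
    · exact ⟨"forward", by tauto, hin⟩
    · exact ⟨"future", by tauto, hin⟩
    · exact ⟨"label", by tauto, hin⟩
    · exact ⟨"target", by tauto, hin⟩
    · exact ⟨"fwd", by tauto, pv_isIn_mono _ "ret_fwd" _ (by decide) hin⟩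
    · exact ⟨"fwd", by tauto, pv_isIn_mono _ "excess_ret_fwd" _ (by decide) hin⟩
    · exact ⟨"oof", by tauto, hin⟩
    · exact ⟨"fwd", by tauto, pv_isIn_mono _ "rank_ret_fwd" _ (by decide) hin⟩
    · exact ⟨"fwd", by tauto, pv_isIn_mono _ "_fwd_" _ (by decide) hin⟩
    · exact ⟨"ahead", by tauto, hin⟩
    · exact ⟨"ahead", by tauto, pv_isIn_mono _ "lookahead" _ (by decide) hin⟩
    · exact ⟨"next_", by tauto, hin⟩
  · rintro ⟨t, ht, hin⟩
    rcases ht with rfl|rfl|rfl|rfl|rfl|rfl|rfl|rfl <;> exact ⟨_, by tauto, hin⟩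

-- character lists of the antichain tokens, and one step of isPrefixOf
theorem pv_tl_fwd : "fwd".toList = ['f','w','d'] := by decide
theorem pv_tl_forward : "forward".toList = ['f','o','r','w','a','r','d'] := by decide
theorem pv_tl_future : "future".toList = ['f','u','t','u','r','e'] := by decide
theorem pv_tl_label : "label".toList = ['l','a','b','e','l'] := by decide
theorem pv_tl_target : "target".toList = ['t','a','r','g','e','t'] := by decide
theorem pv_tl_oof : "oof".toList = ['o','o','f'] := by decide
theorem pv_tl_ahead : "ahead".toList = ['a','h','e','a','d'] := by decide
theorem pv_tl_next : "next_".toList = ['n','e','x','t','_'] := by decide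

theorem pv_ipc (a c : Char) (l rest : List Char) :
    (a :: l).isPrefixOf (c :: rest) = (a == c && l.isPrefixOf rest) := rfl

-- at a given position, the head character's bucket tests exactly the whole
-- antichain: tokens outside the bucket fail on their first character
theorem pv_bucket_complete (c : Char) (rest : List Char) :
    (pvBuckets c).any (fun t => t.toList.isPrefixOf (c :: rest))
      = pvEffectiveTokens.any (fun t => t.toList.isPrefixOf (c :: rest)) := by
  unfold pvBuckets pvEffectiveTokens
  split_ifs with h1 h2 h3 h4 h5 h6
  · subst h1
    simp [pv_tl_fwd, pv_tl_forward, pv_tl_future, pv_tl_label, pv_tl_target,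
      pv_tl_oof, pv_tl_ahead, pv_tl_next, pv_ipc]
  · subst h2
    simp [pv_tl_fwd, pv_tl_forward, pv_tl_future, pv_tl_label, pv_tl_target,
      pv_tl_oof, pv_tl_ahead, pv_tl_next, pv_ipc]
  · subst h3
    simp [pv_tl_fwd, pv_tl_forward, pv_tl_future, pv_tl_label, pv_tl_target,
      pv_tl_oof, pv_tl_ahead, pv_tl_next, pv_ipc]
  · subst h4
    simp [pv_tl_fwd, pv_tl_forward, pv_tl_future, pv_tl_label, pv_tl_target,
      pv_tl_oof, pv_tl_ahead, pv_tl_next, pv_ipc]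
  · subst h5
    simp [pv_tl_fwd, pv_tl_forward, pv_tl_future, pv_tl_label, pv_tl_target,
      pv_tl_oof, pv_tl_ahead, pv_tl_next, pv_ipc]
  · subst h6
    simp [pv_tl_fwd, pv_tl_forward, pv_tl_future, pv_tl_label, pv_tl_target,
      pv_tl_oof, pv_tl_ahead, pv_tl_next, pv_ipc]
  · simp [pv_tl_fwd, pv_tl_forward, pv_tl_future, pv_tl_label, pv_tl_target,
      pv_tl_oof, pv_tl_ahead, pv_tl_next, pv_ipc,
      Ne.symm h1, Ne.symm h2, Ne.symm h3, Ne.symm h4, Ne.symm h5, Ne.symm h6]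

-- the hand-rolled scan finds exactly the infix occurrences of antichain tokens
theorem pv_scan_iff (l : List Char) :
    pvScan l = true ↔ ∃ t ∈ pvEffectiveTokens, t.toList <:+: l := by
  induction l with
  | nil =>
    simp only [pvScan]
    constructor
    · intro h; cases h
    · rintro ⟨t, ht, hinf⟩
      exfalso
      have hnil := List.eq_nil_of_infix_nil hinf
      fin_cases ht <;> simp_all
  | cons c rest ih =>
    simp only [pvScan]
    rw [pv_bucket_complete]
    by_cases h : pvEffectiveTokens.any (fun t => t.toList.isPrefixOf (c :: rest)) = true
    · rw [if_pos h]
      simp only [List.any_eq_true, List.isPrefixOf_iff_prefix] at h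
      obtain ⟨t, ht, hp⟩ := h
      exact iff_of_true rfl ⟨t, ht, hp.isInfix⟩
    · rw [if_neg h, ih]
      simp only [List.any_eq_true, List.isPrefixOf_iff_prefix, not_exists, not_and] at h
      constructor
      · rintro ⟨t, ht, hinf⟩; exact ⟨t, ht, (List.infix_cons_iff).2 (Or.inr hinf)⟩
      · rintro ⟨t, ht, hinf⟩
        rcases (List.infix_cons_iff).1 hinf with hp | hinf'
        · exact absurd hp (h t ht)
        · exact ⟨t, ht, hinf'⟩

-- per feature: A's break-loop flag equals B's positional scan
theorem pv_flag_eq (f : String) :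
    pvTokenLoop (PySem.Str.lower f) pvBannedTokens
      = pvScan (PySem.Str.lower f).toList := by
  rw [pv_tokenLoop_eq_any, pv_tokens_equiv, Bool.eq_iff_iff, pv_scan_iff]
  simp only [List.any_eq_true, PySem.Str.isIn_iff_infix]

theorem pv_foldl_eq_filter (cols acc : List String) :
    cols.foldl pvStep acc
      = acc ++ cols.filter (fun f => pvScan (PySem.Str.lower f).toList) := by
  induction cols generalizing acc with
  | nil => simp
  | cons c rest ih =>
    rw [List.foldl_cons, List.filter_cons]
    have hstep : pvStep acc c
        = if pvScan (PySem.Str.lower c).toList then acc ++ [c] else acc := by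
      simp only [pvStep, pv_flag_eq]
    rw [hstep]
    by_cases h : pvScan (PySem.Str.lower c).toList = true
    · rw [if_pos h, if_pos h, ih, List.append_assoc]
      rfl
    · rw [if_neg h, if_neg h, ih]

-- ===== VERDICT (by name: the statement is the Claim_ definition above) =====
theorem detect_forward_looking_names_spec : Claim_equal_detect_forward_looking_names := by
  intro cols _
  unfold Spec_detect_forward_looking_names detect_forward_looking_names detect_forward_looking_names_alt
  simpa using pv_foldl_eq_filter cols []
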